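-- pv_equiv track=rewrite | github.com/denemorhun/Python-Problems | Leetcode/FB/recursive/encrypted_words_recursive.py | _helper
-- ===== SOURCE A (Python) =====
-- def _helper(s, output):
--
--     size = len(s)
--
--     if size == 0:
--         return output
--
--     middle_idx = size // 2 if size % 2 == 1 else (size - 1) // 2
--
--     output.append(s[middle_idx])
--
--     arr_left = s[0:middle_idx]
--
--     arr_right = s[middle_idx+1:]
--
--     # Append left array
--     if arr_left:
--          _helper(arr_left, output)
--
--     # Append right array
--     if arr_right:
--          _helper(arr_right, output)
--
--     return output
-- ===== SOURCE B (Python) =====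
-- def _helper(s, output):
--     stack = [(0, len(s))]
--     while stack:
--         start, end = stack.pop()
--         if start >= end:
--             continue
--         mid = start + (end - start - 1) // 2
--         output.append(s[mid])
--         stack.append((mid + 1, end))
--         stack.append((start, mid))
--     return output
-- ===== Notes on version B (the rewrite author's own statement) =====
-- stated objective: alternative
-- what changed: A's recursion that slices off fresh left/right substring copies is replaced by an iterative while loop over an explicit stack of (start,end) half-open index ranges into the original string, pushing the right range before the left to preserve pre-order.
import Mathlib
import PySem

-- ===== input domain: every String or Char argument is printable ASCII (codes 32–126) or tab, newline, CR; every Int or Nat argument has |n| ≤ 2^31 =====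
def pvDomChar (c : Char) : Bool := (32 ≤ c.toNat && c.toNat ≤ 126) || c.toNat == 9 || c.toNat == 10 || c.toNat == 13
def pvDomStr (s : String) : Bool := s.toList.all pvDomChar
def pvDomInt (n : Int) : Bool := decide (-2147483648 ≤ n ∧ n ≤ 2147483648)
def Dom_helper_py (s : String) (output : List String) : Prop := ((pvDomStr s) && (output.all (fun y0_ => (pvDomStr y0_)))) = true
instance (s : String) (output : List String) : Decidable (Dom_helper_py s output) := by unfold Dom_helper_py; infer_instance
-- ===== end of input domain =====

-- B replaces A's recursion over substring copies by an iterative while loop over an explicit stack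
-- of (start,end) half-open index ranges into the original string (objective: alternative).
-- A mutates `output` in place (appends); B performs the same appends, and the theorems below are
-- about the return value.

-- ===== PORT A =====
-- termination lemmas for A's port (cited by name in decreasing_by)
lemma pvMidLt (n : Nat) (h : ¬ n = 0) : (if n % 2 = 1 then n / 2 else (n - 1) / 2) < n := by
  have hpos : 0 < n := Nat.pos_of_ne_zero h
  split
  · exact Nat.div_lt_self hpos Nat.one_lt_two
  · exact Nat.lt_of_le_of_lt (Nat.div_le_self _ _) (Nat.sub_lt hpos Nat.one_pos)

lemma pvDecLeft (l : List Char) (h : ¬ l.length = 0) :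
    (l.take (if l.length % 2 = 1 then l.length / 2 else (l.length - 1) / 2)).length < l.length := by
  rw [List.length_take]
  exact Nat.lt_of_le_of_lt (Nat.min_le_left _ _) (pvMidLt l.length h)

lemma pvDecRight (l : List Char) (h : ¬ l.length = 0) :
    (l.drop ((if l.length % 2 = 1 then l.length / 2 else (l.length - 1) / 2) + 1)).length < l.length := by
  rw [List.length_drop]
  exact Nat.sub_lt (Nat.pos_of_ne_zero h) (Nat.succ_pos _)

-- A's recursion, on the character list of s. s[0:mid] / s[mid+1:] are l.take mid / l.drop (mid+1)
-- (exact: PySem.List.slice_to / slice_from with nonnegative bounds); s[middle_idx] is in range,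
-- ported as getD (the default is never used).
def helperAC (l : List Char) (output : List String) : List String :=
  if _h : l.length = 0 then output
  else
    let m := if l.length % 2 = 1 then l.length / 2 else (l.length - 1) / 2
    let out2 := output ++ [String.ofList [l.getD m '?']]
    let left := l.take m
    let right := l.drop (m + 1)
    let out3 := if left ≠ [] then helperAC left out2 else out2
    if right ≠ [] then helperAC right out3 else out3
termination_by l.length
decreasing_by
  · exact pvDecLeft l _h
  · exact pvDecRight l _h

def helper_py (s : String) (output : List String) : List String :=
  helperAC s.toList output

-- ===== PORT B =====
-- B's while loop over the explicit stack of (start, end) ranges, right range pushed before left.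
-- `fuel` is only a structural-recursion totality guard: the loop consumes exactly 2*(end-start)+1
-- steps per pushed range, so the initial fuel 2*len+1 is never exhausted (proved below).
def loopB (l : List Char) (fuel : Nat) (stack : List (Nat × Nat)) (output : List String) : List String :=
  match stack with
  | [] => output
  | (a, b) :: st =>
    match fuel with
    | 0 => output
    | fuel + 1 =>
      if a < b then
        let m := a + (b - a - 1) / 2
        loopB l fuel ((a, m) :: (m + 1, b) :: st) (output ++ [String.ofList [l.getD m '?']])
      else loopB l fuel st output

def helper_py_alt (s : String) (output : List String) : List String :=
  loopB s.toList (2 * s.toList.length + 1) [(0, s.toList.length)] output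

-- ===== PRECONDITION & SPEC =====
def Spec_helper_py (s : String) (output : List String) (out : List String) : Prop := out = helper_py_alt s output
instance (s : String) (output : List String) (out : List String) : Decidable (Spec_helper_py s output out) := by unfold Spec_helper_py; infer_instance

-- ===== CLAIM (what is proved, stated in full; the proofs are below) =====
def Claim_equal_helper_py : Prop := ∀ (s : String) (output : List String), Dom_helper_py s output → Spec_helper_py s output (helper_py s output)

-- ===== LEMMAS AND PROOFS =====

lemma helperAC_nil (out : List String) : helperAC [] out = out := by
  unfold helperAC; simp

-- the guard "if arr: _helper(arr, out)" is redundant since helperAC [] out = out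
lemma helperAC_guard (l : List Char) (out : List String) :
    (if l ≠ [] then helperAC l out else out) = helperAC l out := by
  by_cases h : l = [] <;> simp [h, helperAC_nil]

-- processing one pushed range (with enough fuel) equals one full recursive call of A on the
-- corresponding segment of the original list, consuming exactly 2*(b-a)+1 fuel
lemma loopB_eq (l : List Char) (n : Nat) : ∀ (a b : Nat) (st : List (Nat × Nat)) (out : List String) (fuel : Nat),
    b - a ≤ n → b ≤ l.length → 2 * (b - a) + 1 ≤ fuel →
    loopB l fuel ((a, b) :: st) out =
      loopB l (fuel - (2 * (b - a) + 1)) st (helperAC ((l.drop a).take (b - a)) out) := by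
  induction n with
  | zero =>
    intro a b st out fuel hn _ hf
    obtain ⟨fuel', rfl⟩ : ∃ f', fuel = f' + 1 := ⟨fuel - 1, by omega⟩
    have hba : ¬ a < b := by omega
    rw [loopB]
    simp only [hba, if_neg, not_false_iff]
    have h0 : b - a = 0 := by omega
    rw [h0]
    simp [helperAC_nil]
  | succ n ih =>
    intro a b st out fuel hn hb hf
    obtain ⟨fuel', rfl⟩ : ∃ f', fuel = f' + 1 := ⟨fuel - 1, by omega⟩
    by_cases hab : a < b
    · -- segment facts
      have hlen : ((l.drop a).take (b - a)).length = b - a := by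
        simp only [List.length_take, List.length_drop]; omega
      have hmr : (if (b - a) % 2 = 1 then (b - a) / 2 else (b - a - 1) / 2) = (b - a - 1) / 2 := by
        split <;> omega
      have hmrlt : (b - a - 1) / 2 < b - a := by omega
      have hchar : ((l.drop a).take (b - a)).getD ((b - a - 1) / 2) '?' =
          l.getD (a + (b - a - 1) / 2) '?' := by
        simp only [List.getD, List.getElem?_take, List.getElem?_drop, hmrlt, if_pos]
      have hleft : ((l.drop a).take (b - a)).take ((b - a - 1) / 2) =
          (l.drop a).take ((a + (b - a - 1) / 2) - a) := by
        rw [List.take_take]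
        congr 1
        omega
      have hright : ((l.drop a).take (b - a)).drop ((b - a - 1) / 2 + 1) =
          (l.drop (a + (b - a - 1) / 2 + 1)).take (b - (a + (b - a - 1) / 2 + 1)) := by
        rw [List.drop_take, List.drop_drop]
        congr 1
        omega
      -- unfold B's step
      rw [loopB]
      simp only [hab, if_pos]
      -- two IH applications: left range then right range
      rw [ih a (a + (b - a - 1) / 2) _ _ _ (by omega) (by omega) (by omega),
          ih (a + (b - a - 1) / 2 + 1) b _ _ _ (by omega) (by omega) (by omega)]
      -- unfold A's step
      conv_rhs => rw [helperAC]
      have hne : ¬ ((l.drop a).take (b - a)).length = 0 := by omega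
      rw [dif_neg hne]
      simp only [hlen, hmr, hchar, hleft, hright, helperAC_guard]
      congr 1
      omega
    · rw [loopB]
      simp only [hab, if_neg, not_false_iff]
      have h0 : b - a = 0 := by omega
      rw [h0]
      simp [helperAC_nil]

-- ===== VERDICT (by name: the statement is the Claim_ definition above) =====
theorem helper_py_spec : Claim_equal_helper_py := by
  intro s output _dom
  unfold Spec_helper_py helper_py helper_py_alt
  rw [loopB_eq s.toList s.toList.length 0 s.toList.length [] output _
        (by omega) (le_refl _) (by omega)]
  rw [loopB]
  rw [Nat.sub_zero, List.drop_zero, List.take_length]
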